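-- pv_equiv track=rewrite | github.com/Coamithra/NotZelda | tools/gen_tile_data.py | merge_pixels_to_rects
-- ===== SOURCE A (Python) =====
-- def merge_pixels_to_rects(color_key, pixels):
--     """Merge 1x1 pixels into wider rects by scanning left-to-right per row."""
--     if not pixels:
--         return []
--     pset = set(pixels)
--     used = set()
--     rects = []
--     for py in range(16):
--         px = 0
--         while px < 16:
--             if (px, py) in pset and (px, py) not in used:
--                 w = 1
--                 while px + w < 16 and (px + w, py) in pset and (px + w, py) not in used:
--                     w += 1
--                 for i in range(w):
--                     used.add((px + i, py))
--                 rects.append([color_key, px, py, w, 1])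
--                 px += w
--             else:
--                 px += 1
--     return rects
-- ===== SOURCE B (Python) =====
-- def merge_pixels_to_rects(color_key, pixels):
--     """Merge 1x1 pixels into wider rects: per row, filter the present cells
--     and group maximal consecutive runs in one pass (no used-set, no inner scan)."""
--     if not pixels:
--         return []
--     pset = set(pixels)
--     rects = []
--     for y in range(16):
--         start = prev = None
--         for x in range(16):
--             if (x, y) not in pset:
--                 continue
--             if start is None:
--                 start = prev = x
--             elif x == prev + 1:
--                 prev = x
--             else:
--                 rects.append([color_key, start, y, prev - start + 1, 1])
--                 start = prev = x
--         if start is not None: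
--             rects.append([color_key, start, y, prev - start + 1, 1])
--     return rects
-- ===== Notes on version B (the rewrite author's own statement) =====
-- stated objective: simpler
-- what changed: A scans each row cell-by-cell with an inner width-extension while loop and a `used` bookkeeping set; B does one run-grouping pass per row that only tracks the current run's start/prev and needs no inner scan and no used set.
import Mathlib
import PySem

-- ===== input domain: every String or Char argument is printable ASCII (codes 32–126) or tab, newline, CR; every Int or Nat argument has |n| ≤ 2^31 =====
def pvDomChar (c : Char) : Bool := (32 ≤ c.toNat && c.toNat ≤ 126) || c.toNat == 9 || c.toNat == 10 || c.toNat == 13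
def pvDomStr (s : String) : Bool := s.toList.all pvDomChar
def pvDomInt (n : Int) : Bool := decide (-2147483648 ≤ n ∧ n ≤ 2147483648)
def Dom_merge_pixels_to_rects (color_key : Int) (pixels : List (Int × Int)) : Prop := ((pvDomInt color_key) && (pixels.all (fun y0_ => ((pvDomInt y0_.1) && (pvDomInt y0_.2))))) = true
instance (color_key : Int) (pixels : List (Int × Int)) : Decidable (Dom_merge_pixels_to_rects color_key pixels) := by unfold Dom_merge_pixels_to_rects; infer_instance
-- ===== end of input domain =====

-- B replaces A's per-cell grid scan (inner width-extension while loop plus a `used` bookkeeping set)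
-- by a single run-grouping pass per row that tracks only the current run's start/prev; objective: simpler.

-- ===== PORT A =====
-- inner `while px + w < 16 and (px + w, py) in pset and (px + w, py) not in used: w += 1`
def pvAWidth (pset used : PySem.Set (Int × Int)) (py px w : Nat) : Nat :=
  if h : px + w < 16 ∧ (PySem.Set.contains pset (((px + w : Nat) : Int), (py : Int))
        && !PySem.Set.contains used (((px + w : Nat) : Int), (py : Int))) = true then
    pvAWidth pset used py px (w + 1)
  else w
termination_by 16 - (px + w)

-- termination helper for the row loop (the port cites it in `decreasing_by`)
theorem pvAWidth_ge (pset used : PySem.Set (Int × Int)) (py px : Nat) :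
    ∀ w, w ≤ pvAWidth pset used py px w := by
  intro w
  induction h : 16 - (px + w) using Nat.strong_induction_on generalizing w with
  | _ n ih =>
    unfold pvAWidth
    split
    · rename_i hc
      have := ih (16 - (px + (w + 1))) (by omega) (w + 1) rfl
      omega
    · exact le_refl w

-- `while px < 16:` body of the per-row scan of A (w is computed by pvAWidth, as in the Python)
def pvARow (ck : Int) (pset : PySem.Set (Int × Int)) (py px : Nat)
    (used : PySem.Set (Int × Int)) (rects : List (List Int)) :
    PySem.Set (Int × Int) × List (List Int) :=
  if hpx : px < 16 then
    if (PySem.Set.contains pset ((px : Int), (py : Int))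
          && !PySem.Set.contains used ((px : Int), (py : Int))) = true then
      pvARow ck pset py (px + pvAWidth pset used py px 1)
        ((List.range (pvAWidth pset used py px 1)).foldl
          (fun u i => PySem.Set.add u (((px + i : Nat) : Int), (py : Int))) used)
        (rects ++ [[ck, (px : Int), (py : Int), ((pvAWidth pset used py px 1 : Nat) : Int), 1]])
    else
      pvARow ck pset py (px + 1) used rects
  else (used, rects)
termination_by 16 - px
decreasing_by
  · have := pvAWidth_ge pset used py px 1; omega
  · omega

def merge_pixels_to_rects (color_key : Int) (pixels : List (Int × Int)) : List (List Int) :=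
  if pixels = [] then []
  else
    ((List.range 16).foldl
      (fun st py => pvARow color_key (PySem.Set.ofList pixels) py 0 st.1 st.2)
      ((PySem.Set.empty : PySem.Set (Int × Int)), [])).2

-- ===== PORT B =====
-- one step of B's run-grouping pass: skip absent cells, else extend or flush+restart the run
def pvBStep (ck : Int) (pset : PySem.Set (Int × Int)) (y : Nat)
    (st : Option (Nat × Nat) × List (List Int)) (x : Nat) :
    Option (Nat × Nat) × List (List Int) :=
  if PySem.Set.contains pset ((x : Int), (y : Int)) = true then
    match st.1 with
    | none => (some (x, x), st.2)
    | some (s, p) =>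
      if x = p + 1 then (some (s, x), st.2)
      else (some (x, x), st.2 ++ [[ck, (s : Int), (y : Int), (p : Int) - (s : Int) + 1, 1]])
  else st

-- the trailing `if start is not None: rects.append(...)`
def pvBFlush (ck : Int) (y : Nat) (st : Option (Nat × Nat) × List (List Int)) : List (List Int) :=
  match st.1 with
  | none => st.2
  | some (s, p) => st.2 ++ [[ck, (s : Int), (y : Int), (p : Int) - (s : Int) + 1, 1]]

def merge_pixels_to_rects_alt (color_key : Int) (pixels : List (Int × Int)) : List (List Int) :=
  if pixels = [] then []
  else
    (List.range 16).foldl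
      (fun rects y =>
        pvBFlush color_key y ((List.range 16).foldl
          (pvBStep color_key (PySem.Set.ofList pixels) y) (none, rects)))
      []

-- ===== PRECONDITION & SPEC =====
def Spec_merge_pixels_to_rects (color_key : Int) (pixels : List (Int × Int)) (out : List (List Int)) : Prop := out = merge_pixels_to_rects_alt color_key pixels
instance (color_key : Int) (pixels : List (Int × Int)) (out : List (List Int)) : Decidable (Spec_merge_pixels_to_rects color_key pixels out) := by unfold Spec_merge_pixels_to_rects; infer_instance

-- ===== CLAIM (what is proved, stated in full; the proofs are below) =====
def Claim_equal_merge_pixels_to_rects : Prop := ∀ (color_key : Int) (pixels : List (Int × Int)), Dom_merge_pixels_to_rects color_key pixels → Spec_merge_pixels_to_rects color_key pixels (merge_pixels_to_rects color_key pixels)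

-- ===== LEMMAS AND PROOFS =====

-- `used`-free version of A's inner width loop, over an abstract row predicate f
def pWidth (f : Nat → Bool) (px w : Nat) : Nat :=
  if h : px + w < 16 ∧ f (px + w) = true then pWidth f px (w + 1) else w
termination_by 16 - (px + w)

theorem pWidth_ge (f : Nat → Bool) (px : Nat) : ∀ w, w ≤ pWidth f px w := by
  intro w
  induction h : 16 - (px + w) using Nat.strong_induction_on generalizing w with
  | _ n ih =>
    unfold pWidth
    split
    · rename_i hc
      have := ih (16 - (px + (w + 1))) (by omega) (w + 1) rfl
      omega
    · exact le_refl w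

-- `used`-free version of A's row scan
def pScan (ck : Int) (y : Nat) (f : Nat → Bool) (px : Nat) (rects : List (List Int)) :
    List (List Int) :=
  if hpx : px < 16 then
    if f px then
      pScan ck y f (px + pWidth f px 1)
        (rects ++ [[ck, (px : Int), (y : Int), ((pWidth f px 1 : Nat) : Int), 1]])
    else pScan ck y f (px + 1) rects
  else rects
termination_by 16 - px
decreasing_by
  · have := pWidth_ge f px 1; omega
  · omega

-- the invariant that makes A's `used` tests vacuous
def UInv (used : PySem.Set (Int × Int)) (py px : Nat) : Prop :=
  ∀ q ∈ used, q.2 < (py : Int) ∨ (q.2 = (py : Int) ∧ q.1 < (px : Int))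

theorem UInv_contains_false (used : PySem.Set (Int × Int)) (py px x : Nat)
    (hI : UInv used py px) (hx : px ≤ x) :
    PySem.Set.contains used ((x : Int), (py : Int)) = false := by
  by_contra h
  rw [Bool.not_eq_false, PySem.Set.contains_iff] at h
  rcases hI _ h with h1 | ⟨_, h2⟩
  · exact absurd h1 (lt_irrefl _)
  · have hxx : (x : Int) < (px : Int) := h2
    omega

theorem pvAWidth_eq_pWidth (pset used : PySem.Set (Int × Int)) (py px : Nat)
    (f : Nat → Bool) (hfeq : ∀ x, f x = PySem.Set.contains pset ((x : Int), (py : Int)))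
    (hI : UInv used py px) :
    ∀ w, pvAWidth pset used py px w = pWidth f px w := by
  intro w
  induction h : 16 - (px + w) using Nat.strong_induction_on generalizing w with
  | _ n ih =>
    unfold pvAWidth pWidth
    have husd : PySem.Set.contains used (((px + w : Nat) : Int), (py : Int)) = false :=
      UInv_contains_false used py px (px + w) hI (by omega)
    rw [husd, hfeq (px + w)]
    simp only [Bool.not_false, Bool.and_true]
    split
    · exact ih (16 - (px + (w + 1))) (by omega) (w + 1) rfl
    · rfl

-- membership after adding a run of cells to `used`
theorem mem_addRun (px py : Nat) (used : PySem.Set (Int × Int)) (q : Int × Int) :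
    ∀ w, q ∈ (List.range w).foldl
        (fun u i => PySem.Set.add u (((px + i : Nat) : Int), (py : Int))) used
      ↔ q ∈ used ∨ ∃ i < w, q = (((px + i : Nat) : Int), (py : Int)) := by
  intro w
  induction w with
  | zero => simp
  | succ w ih =>
    rw [List.range_succ, List.foldl_append]
    simp only [List.foldl_cons, List.foldl_nil, PySem.Set.mem_add, ih]
    constructor
    · rintro (⟨h | ⟨i, hi, hq⟩⟩ | hq)
      · exact Or.inl h
      · exact Or.inr ⟨i, by omega, hq⟩
      · exact Or.inr ⟨w, by omega, hq⟩
    · rintro (h | ⟨i, hi, hq⟩)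
      · exact Or.inl (Or.inl h)
      · by_cases hiw : i < w
        · exact Or.inl (Or.inr ⟨i, hiw, hq⟩)
        · have : i = w := by omega
          subst this; exact Or.inr hq

-- A's row loop equals the pure scan, and the cells it adds to `used` stay in row py
theorem pvARow_eq_pScan (ck : Int) (pset : PySem.Set (Int × Int)) (py : Nat)
    (f : Nat → Bool) (hfeq : ∀ x, f x = PySem.Set.contains pset ((x : Int), (py : Int))) :
    ∀ px used rects, UInv used py px →
      (pvARow ck pset py px used rects).2 = pScan ck py f px rects
      ∧ ∀ q ∈ (pvARow ck pset py px used rects).1, q ∈ used ∨ q.2 = (py : Int) := by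
  intro px
  induction h : 16 - px using Nat.strong_induction_on generalizing px with
  | _ n ih =>
    intro used rects hI
    unfold pvARow pScan
    by_cases hpx : px < 16
    · simp only [dif_pos hpx]
      have husd : PySem.Set.contains used ((px : Int), (py : Int)) = false :=
        UInv_contains_false used py px px hI (le_refl px)
      rw [husd, ← hfeq px]
      simp only [Bool.not_false, Bool.and_true]
      by_cases hf : f px = true
      · rw [if_pos hf, if_pos hf, pvAWidth_eq_pWidth pset used py px f hfeq hI 1]
        have hw1 : 1 ≤ pWidth f px 1 := pWidth_ge f px 1
        have hI' : UInv ((List.range (pWidth f px 1)).foldl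
            (fun u i => PySem.Set.add u (((px + i : Nat) : Int), (py : Int))) used)
            py (px + pWidth f px 1) := by
          intro q hq
          rcases (mem_addRun px py used q (pWidth f px 1)).mp hq with h' | ⟨i, hi, hq'⟩
          · rcases hI q h' with h1 | ⟨h1, h2⟩
            · exact Or.inl h1
            · exact Or.inr ⟨h1, by omega⟩
          · subst hq'
            refine Or.inr ⟨rfl, ?_⟩
            have : (i : Int) < ((pWidth f px 1 : Nat) : Int) := by exact_mod_cast hi
            push_cast
            omega
        have hrec := ih (16 - (px + pWidth f px 1)) (by omega) (px + pWidth f px 1) rfl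
          _ (rects ++ [[ck, (px : Int), (py : Int), ((pWidth f px 1 : Nat) : Int), 1]]) hI'
        refine ⟨hrec.1, fun q hq => ?_⟩
        rcases hrec.2 q hq with h' | h'
        · rcases (mem_addRun px py used q (pWidth f px 1)).mp h' with h'' | ⟨i, _, hq'⟩
          · exact Or.inl h''
          · subst hq'; exact Or.inr rfl
        · exact Or.inr h'
      · rw [if_neg hf, if_neg hf]
        have hI' : UInv used py (px + 1) := by
          intro q hq
          rcases hI q hq with h1 | ⟨h1, h2⟩
          · exact Or.inl h1
          · exact Or.inr ⟨h1, by omega⟩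
        exact ih (16 - (px + 1)) (by omega) (px + 1) rfl used rects hI'
    · simp only [dif_neg hpx]
      exact ⟨by trivial, fun q hq => Or.inl hq⟩

-- facts about the pure width: the run is present and ends at a gap or the border
theorem pWidth_facts (f : Nat → Bool) (px : Nat) :
    ∀ w, px + w ≤ 16 → (∀ i, i < w → f (px + i) = true) →
      px + pWidth f px w ≤ 16
      ∧ (∀ i, i < pWidth f px w → f (px + i) = true)
      ∧ (px + pWidth f px w < 16 → f (px + pWidth f px w) = false) := by
  intro w
  induction h : 16 - (px + w) using Nat.strong_induction_on generalizing w with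
  | _ n ih =>
    intro hle hall
    unfold pWidth
    split
    · rename_i hc
      have hall' : ∀ i, i < w + 1 → f (px + i) = true := by
        intro i hi
        by_cases hiw : i < w
        · exact hall i hiw
        · have : i = w := by omega
          subst this; exact hc.2
      exact ih (16 - (px + (w + 1))) (by omega) (w + 1) rfl (by omega) hall'
    · rename_i hc
      refine ⟨hle, hall, fun hlt => ?_⟩
      rcases Bool.eq_false_or_eq_true (f (px + w)) with h' | h'
      · exact absurd ⟨hlt, h'⟩ hc
      · exact h'

-- absorbing a fully-present consecutive run into B's state
theorem foldl_run (ck : Int) (pset : PySem.Set (Int × Int)) (y : Nat) (rects : List (List Int)) :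
    ∀ k s p, (∀ i, i < k → PySem.Set.contains pset (((p + 1 + i : Nat) : Int), (y : Int)) = true) →
      (List.range' (p + 1) k).foldl (pvBStep ck pset y) (some (s, p), rects)
        = (some (s, p + k), rects) := by
  intro k
  induction k with
  | zero => intro s p _; simp
  | succ k ih =>
    intro s p hall
    rw [List.range'_succ, List.foldl_cons]
    have h0 : PySem.Set.contains pset (((p + 1 : Nat) : Int), (y : Int)) = true := by
      have := hall 0 (by omega); simpa using this
    have hstep : pvBStep ck pset y (some (s, p), rects) (p + 1) = (some (s, p + 1), rects) := by
      unfold pvBStep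
      rw [if_pos h0]
      simp
    rw [hstep]
    have hall' : ∀ i, i < k →
        PySem.Set.contains pset (((p + 1 + 1 + i : Nat) : Int), (y : Int)) = true := by
      intro i hi
      have := hall (i + 1) (by omega)
      have he : p + 1 + (i + 1) = p + 1 + 1 + i := by omega
      rwa [he] at this
    rw [ih s (p + 1) hall']
    have he : p + 1 + k = p + (k + 1) := by omega
    rw [he]

-- a pending run whose successor never occurs can be flushed immediately
theorem pend_flush (ck : Int) (pset : PySem.Set (Int × Int)) (y : Nat) :
    ∀ (xs : List Nat) (s p : Nat) (rects : List (List Int)),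
      (∀ x ∈ xs, p + 1 < x) →
      pvBFlush ck y (xs.foldl (pvBStep ck pset y) (some (s, p), rects))
        = pvBFlush ck y (xs.foldl (pvBStep ck pset y)
            (none, rects ++ [[ck, (s : Int), (y : Int), (p : Int) - (s : Int) + 1, 1]])) := by
  intro xs
  induction xs with
  | nil => intro s p rects _; simp [pvBFlush]
  | cons x t ih =>
    intro s p rects hgt
    simp only [List.foldl_cons]
    by_cases hf : PySem.Set.contains pset ((x : Int), (y : Int)) = true
    · have hx : x ≠ p + 1 := by have := hgt x (List.mem_cons_self); omega
      have h1 : pvBStep ck pset y (some (s, p), rects) x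
          = (some (x, x), rects ++ [[ck, (s : Int), (y : Int), (p : Int) - (s : Int) + 1, 1]]) := by
        unfold pvBStep; rw [if_pos hf]; simp [hx]
      have h2 : pvBStep ck pset y
          (none, rects ++ [[ck, (s : Int), (y : Int), (p : Int) - (s : Int) + 1, 1]]) x
          = (some (x, x), rects ++ [[ck, (s : Int), (y : Int), (p : Int) - (s : Int) + 1, 1]]) := by
        unfold pvBStep; rw [if_pos hf]
      rw [h1, h2]
    · rw [Bool.not_eq_true] at hf
      have h1 : pvBStep ck pset y (some (s, p), rects) x = (some (s, p), rects) := by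
        unfold pvBStep; rw [hf]; simp
      have h2 : pvBStep ck pset y
          (none, rects ++ [[ck, (s : Int), (y : Int), (p : Int) - (s : Int) + 1, 1]]) x
          = (none, rects ++ [[ck, (s : Int), (y : Int), (p : Int) - (s : Int) + 1, 1]]) := by
        unfold pvBStep; rw [hf]; simp
      rw [h1, h2]
      exact ih s p rects (fun x' hx' => hgt x' (List.mem_cons_of_mem _ hx'))

-- core per-row equivalence: the pure scan equals B's grouping pass over the rest of the row
theorem pScan_eq_group (ck : Int) (pset : PySem.Set (Int × Int)) (y : Nat)
    (f : Nat → Bool) (hfeq : ∀ x, f x = PySem.Set.contains pset ((x : Int), (y : Int))) :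
    ∀ px rects,
      pScan ck y f px rects
        = pvBFlush ck y ((List.range' px (16 - px)).foldl (pvBStep ck pset y) (none, rects)) := by
  intro px
  induction h : 16 - px using Nat.strong_induction_on generalizing px with
  | _ n ih =>
    subst h
    intro rects
    unfold pScan
    by_cases hpx : px < 16
    · rw [dif_pos hpx]
      by_cases hf : f px = true
      · rw [if_pos hf]
        have hw1 : 1 ≤ pWidth f px 1 := pWidth_ge f px 1
        obtain ⟨hle16, hrun, hgap⟩ := pWidth_facts f px 1 (by omega)
          (by intro i hi
              have : i = 0 := by omega
              subst this
              simpa using hf)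
        -- split the range into the present run and the rest
        have hsplit : List.range' px (16 - px)
            = List.range' px (pWidth f px 1)
              ++ List.range' (px + pWidth f px 1) (16 - px - pWidth f px 1) := by
          rw [List.range'_append_1]
          congr 1
          omega
        rw [hsplit, List.foldl_append]
        -- the run part fills B's state with (px, px + w - 1)
        have hrunfold : (List.range' px (pWidth f px 1)).foldl (pvBStep ck pset y) (none, rects)
            = (some (px, px + (pWidth f px 1 - 1)), rects) := by
          have hw' : pWidth f px 1 = (pWidth f px 1 - 1) + 1 := by omega
          rw [hw', List.range'_succ, List.foldl_cons]
          have hstep0 : pvBStep ck pset y (none, rects) px = (some (px, px), rects) := by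
            unfold pvBStep
            rw [if_pos (by rw [← hfeq px]; exact hf)]
          rw [hstep0]
          exact foldl_run ck pset y rects (pWidth f px 1 - 1) px px
            (by intro i hi
                have := hrun (1 + i) (by omega)
                have he : px + (1 + i) = px + 1 + i := by omega
                rw [he] at this
                rw [← hfeq (px + 1 + i)]
                exact this)
        rw [hrunfold]
        -- normalise B's flushed rect to A's [ck, px, y, w, 1]
        have hrw : ((px + (pWidth f px 1 - 1) : Nat) : Int) - (px : Int) + 1
            = ((pWidth f px 1 : Nat) : Int) := by push_cast; omega
        by_cases hend : px + pWidth f px 1 < 16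
        · have hgapf : PySem.Set.contains pset (((px + pWidth f px 1 : Nat) : Int), (y : Int))
              = false := by rw [← hfeq]; exact hgap hend
          have hr2 : 16 - px - pWidth f px 1 = (16 - (px + pWidth f px 1 + 1)) + 1 := by omega
          rw [hr2, List.range'_succ, List.foldl_cons]
          have hskip : pvBStep ck pset y (some (px, px + (pWidth f px 1 - 1)), rects)
              (px + pWidth f px 1) = (some (px, px + (pWidth f px 1 - 1)), rects) := by
            unfold pvBStep; rw [hgapf]; simp
          rw [hskip]
          rw [pend_flush ck pset y (List.range' (px + pWidth f px 1 + 1)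
              (16 - (px + pWidth f px 1 + 1))) px (px + (pWidth f px 1 - 1)) rects
            (by intro x hx
                have := List.mem_range'_1.mp hx
                omega)]
          rw [hrw]
          -- on the scan side: the gap cell steps px+w to px+w+1
          have hstep : pScan ck y f (px + pWidth f px 1)
              (rects ++ [[ck, (px : Int), (y : Int), ((pWidth f px 1 : Nat) : Int), 1]])
              = pScan ck y f (px + pWidth f px 1 + 1)
                (rects ++ [[ck, (px : Int), (y : Int), ((pWidth f px 1 : Nat) : Int), 1]]) := by
            conv_lhs => unfold pScan
            rw [dif_pos hend, if_neg (by rw [hgap hend]; simp)]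
          rw [hstep]
          have := ih (16 - (px + pWidth f px 1 + 1)) (by omega) (px + pWidth f px 1 + 1) rfl
            (rects ++ [[ck, (px : Int), (y : Int), ((pWidth f px 1 : Nat) : Int), 1]])
          rw [this]
        · -- the run reaches the right border: nothing is left to fold
          have hz : 16 - px - pWidth f px 1 = 0 := by omega
          rw [hz]
          simp only [List.range'_zero, List.foldl_nil]
          have hdone : pScan ck y f (px + pWidth f px 1)
              (rects ++ [[ck, (px : Int), (y : Int), ((pWidth f px 1 : Nat) : Int), 1]])
              = rects ++ [[ck, (px : Int), (y : Int), ((pWidth f px 1 : Nat) : Int), 1]] := by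
            unfold pScan
            rw [dif_neg (by omega)]
          rw [hdone]
          unfold pvBFlush
          simp only
          rw [hrw]
      · rw [if_neg hf]
        have hr : 16 - px = (16 - (px + 1)) + 1 := by omega
        rw [hr, List.range'_succ, List.foldl_cons]
        have hf' : PySem.Set.contains pset ((px : Int), (y : Int)) = false := by
          rw [Bool.not_eq_true] at hf
          rw [← hfeq]; exact hf
        have hskip : pvBStep ck pset y (none, rects) px = (none, rects) := by
          unfold pvBStep; rw [hf']; simp
        rw [hskip]
        exact ih (16 - (px + 1)) (by omega) (px + 1) rfl rects
    · rw [dif_neg hpx]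
      have hz : 16 - px = 0 := by omega
      rw [hz]
      simp [pvBFlush]

-- the outer loop over the 16 rows
theorem rows_eq (ck : Int) (pset : PySem.Set (Int × Int)) :
    ∀ (ys : List Nat), ys.Pairwise (· < ·) →
      ∀ (used : PySem.Set (Int × Int)) (rects : List (List Int)),
        (∀ q ∈ used, ∀ y' ∈ ys, q.2 < (y' : Int)) →
        (ys.foldl (fun st py => pvARow ck pset py 0 st.1 st.2) (used, rects)).2
          = ys.foldl (fun rects y =>
              pvBFlush ck y ((List.range 16).foldl (pvBStep ck pset y) (none, rects))) rects := by
  intro ys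
  induction ys with
  | nil => intro _ used rects _; rfl
  | cons y t ih =>
    intro hpw used rects hbelow
    simp only [List.foldl_cons]
    have hI : UInv used y 0 := by
      intro q hq
      exact Or.inl (hbelow q hq y List.mem_cons_self)
    obtain ⟨heq, hused⟩ := pvARow_eq_pScan ck pset y
      (fun x => PySem.Set.contains pset ((x : Int), (y : Int))) (fun _ => rfl)
      0 used rects hI
    have hrow : (pvARow ck pset y 0 used rects).2
        = pvBFlush ck y ((List.range 16).foldl (pvBStep ck pset y) (none, rects)) := by
      rw [heq, pScan_eq_group ck pset y
        (fun x => PySem.Set.contains pset ((x : Int), (y : Int))) (fun _ => rfl) 0 rects,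
        List.range_eq_range']
    have hyt : ∀ y' ∈ t, y < y' := fun y' hy' => List.rel_of_pairwise_cons hpw hy'
    have hbelow' : ∀ q ∈ (pvARow ck pset y 0 used rects).1, ∀ y' ∈ t, q.2 < (y' : Int) := by
      intro q hq y' hy'
      rcases hused q hq with h' | h'
      · exact hbelow q h' y' (List.mem_cons_of_mem _ hy')
      · rw [h']
        exact_mod_cast hyt y' hy'
    rw [ih hpw.tail _ _ hbelow', hrow]

-- ===== VERDICT (by name: the statement is the Claim_ definition above) =====
theorem merge_pixels_to_rects_spec : Claim_equal_merge_pixels_to_rects := by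
  intro color_key pixels _
  unfold Spec_merge_pixels_to_rects merge_pixels_to_rects merge_pixels_to_rects_alt
  by_cases hnil : pixels = []
  · rw [if_pos hnil, if_pos hnil]
  · rw [if_neg hnil, if_neg hnil]
    exact rows_eq color_key (PySem.Set.ofList pixels) (List.range 16)
      List.pairwise_lt_range PySem.Set.empty [] (by intro q hq; simp [PySem.Set.empty] at hq)
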